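-- pv_equiv track=rewrite | github.com/sorgom/dstw | scripts/modUtilz.py | commonLen
-- ===== SOURCE A (Python) =====
-- def commonLen(lines:list):
--     if len(lines) < 1: return 0
--     res = len(lines[0])
--     for n in range(1, len(lines)):
--         lin1 = lines[n - 1]
--         lin2 = lines[n]
--         ln = min(res, len(lin2))
--         res = 0
--         for p in range(0, ln):
--             if lin1[p] == lin2[p]: res += 1
--             else: break
--     return res
-- ===== SOURCE B (Python) =====
-- def commonLen(lines: list):
--     res = 0
--     for col in zip(*lines):
--         if all(c == col[0] for c in col):
--             res += 1
--         else:
--             break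
--     return res
-- ===== Notes on version B (the rewrite author's own statement) =====
-- stated objective: idiomatic
-- what changed: Replaces the row-wise consecutive-pair scan with a narrowing accumulator by a column-wise scan over zip(*lines), counting leading columns whose characters all agree.
import Mathlib
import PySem

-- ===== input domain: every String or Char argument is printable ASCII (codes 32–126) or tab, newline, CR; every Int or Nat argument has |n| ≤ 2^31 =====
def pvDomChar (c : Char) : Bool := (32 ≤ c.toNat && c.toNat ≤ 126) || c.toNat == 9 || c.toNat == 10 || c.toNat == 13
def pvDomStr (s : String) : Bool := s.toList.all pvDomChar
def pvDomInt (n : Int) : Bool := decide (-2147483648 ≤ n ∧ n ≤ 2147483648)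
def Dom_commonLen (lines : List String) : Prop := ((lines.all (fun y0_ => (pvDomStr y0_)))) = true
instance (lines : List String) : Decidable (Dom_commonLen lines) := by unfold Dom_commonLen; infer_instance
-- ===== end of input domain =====

-- B computes the common-prefix length column-wise over zip(*lines) instead of A's
-- row-wise consecutive-pair scan with a narrowing accumulator (objective: idiomatic).

-- ===== PORT A =====
-- inner 'for p in range(0, ln): if lin1[p] == lin2[p]: res += 1 else: break'
-- (indices are always in range here, so comparing the Option values of pyGet? is exact)
def innerA (lin1 lin2 : String) : List Int → Int → Int
  | [], res => res
  | p :: rest, res =>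
    if PySem.Str.pyGet? lin1 p = PySem.Str.pyGet? lin2 p then innerA lin1 lin2 rest (res + 1)
    else res

-- outer 'for n in range(1, len(lines))'; the .getD "" only totalises pyGet? (n is always in range)
def outerA (lines : List String) : List Int → Int → Int
  | [], res => res
  | n :: rest, res =>
    let lin1 := (PySem.List.pyGet? lines (n - 1)).getD ""
    let lin2 := (PySem.List.pyGet? lines n).getD ""
    let ln := min res (PySem.Str.len lin2)
    outerA lines rest (innerA lin1 lin2 (PySem.List.pyRange 0 ln 1) 0)

def commonLen (lines : List String) : Int :=
  if (lines.length : Int) < 1 then 0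
  else
    outerA lines (PySem.List.pyRange 1 (lines.length : Int) 1)
      (PySem.Str.len ((PySem.List.pyGet? lines 0).getD ""))

-- ===== PORT B =====
-- zip(*lines): the list of columns, stopping at the shortest line (headD/tail guards only totalise)
def pyZipCols : List (List Char) → List (List Char)
  | [] => []
  | r0 :: rest =>
    if _h : [] ∉ r0 :: rest then
      ((r0 :: rest).map (fun r => r.headD ' ')) :: pyZipCols (r0.tail :: rest.map List.tail)
    else []
termination_by rows => (rows.headD []).length
decreasing_by
  simp only [List.headD_cons, List.length_tail]
  have : r0 ≠ [] := by simp_all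
  have := List.length_pos_of_ne_nil this
  omega

-- 'for col in zip(*lines): if all(c == col[0] for c in col): res += 1 else: break'
def loopB : List (List Char) → Int → Int
  | [], res => res
  | col :: rest, res =>
    if col.all (fun c => c = col.headD ' ') then loopB rest (res + 1) else res

def commonLen_alt (lines : List String) : Int :=
  loopB (pyZipCols (lines.map String.toList)) 0

-- ===== PRECONDITION & SPEC =====
def Spec_commonLen (lines : List String) (out : Int) : Prop := out = commonLen_alt lines
instance (lines : List String) (out : Int) : Decidable (Spec_commonLen lines out) := by unfold Spec_commonLen; infer_instance

-- ===== CLAIM (what is proved, stated in full; the proofs are below) =====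
def Claim_equal_commonLen : Prop := ∀ (lines : List String), Dom_commonLen lines → Spec_commonLen lines (commonLen lines)

-- ===== LEMMAS AND PROOFS =====

-- length of the common prefix of two char lists
def cp2 : List Char → List Char → Nat
  | a :: s, b :: t => if a = b then cp2 s t + 1 else 0
  | [], _ => 0
  | _ :: _, [] => 0

-- A's quantity: min over consecutive common-prefix lengths, capped by the last length
def chainN : List Char → List (List Char) → Nat
  | prev, [] => prev.length
  | prev, cur :: rest => min (cp2 prev cur) (chainN cur rest)

-- clean Nat-level form of A's outer loop
def foldA : Nat → List Char → List (List Char) → Nat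
  | res, _, [] => res
  | res, prev, cur :: rest => foldA (min res (cp2 prev cur)) cur rest

-- column-wise recursion both sides are reduced to
def lcpRec : List (List Char) → Nat
  | [] => 0
  | r0 :: rest =>
    if _h : [] ∉ r0 :: rest ∧ ∀ r ∈ r0 :: rest, r.headD ' ' = r0.headD ' ' then
      1 + lcpRec (r0.tail :: rest.map List.tail)
    else 0
termination_by rows => (rows.headD []).length
decreasing_by
  simp only [List.headD_cons, List.length_tail]
  have : r0 ≠ [] := by simp_all
  have := List.length_pos_of_ne_nil this
  omega

theorem cp2_le_left (s t : List Char) : cp2 s t ≤ s.length := by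
  induction s generalizing t with
  | nil => simp [cp2]
  | cons a s ih =>
    cases t with
    | nil => simp [cp2]
    | cons b t =>
      simp only [cp2]
      split
      · have := ih t; simp; omega
      · simp


theorem cp2_le_right (s t : List Char) : cp2 s t ≤ t.length := by
  induction s generalizing t with
  | nil => simp [cp2]
  | cons a s ih =>
    cases t with
    | nil => simp [cp2]
    | cons b t =>
      simp only [cp2]
      split
      · have := ih t; simp; omega
      · simp


theorem chainN_le (prev : List Char) (ls : List (List Char)) : chainN prev ls ≤ prev.length := by
  induction ls generalizing prev with
  | nil => simp [chainN]
  | cons cur rest ih =>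
    simp only [chainN]
    have := cp2_le_left prev cur
    omega

theorem innerA_eq (s t : String) (k p : Nat) (res : Int)
    (hs : p + k ≤ s.toList.length) (ht : p + k ≤ t.toList.length) :
    innerA s t (PySem.List.pyRange (p : Int) ((p + k : Nat) : Int) 1) res
      = res + (min k (cp2 (s.toList.drop p) (t.toList.drop p)) : Int) := by
  induction k generalizing p res with
  | zero =>
    rw [PySem.List.pyRange_one_eq_nil (by push_cast; omega)]
    simp [innerA]
  | succ k ih =>
    rw [PySem.List.pyRange_one_cons (by push_cast; omega)]
    have hp_s : p < s.toList.length := by omega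
    have hp_t : p < t.toList.length := by omega
    simp only [innerA, PySem.Str.pyGet?_natCast,
      List.getElem?_eq_getElem hp_s, List.getElem?_eq_getElem hp_t]
    have hds := (List.getElem_cons_drop (as := s.toList) (i := p) hp_s).symm
    have hdt := (List.getElem_cons_drop (as := t.toList) (i := p) hp_t).symm
    by_cases hc : s.toList[p] = t.toList[p]
    · rw [if_pos (by rw [hc])]
      have step : ((p : Int) + 1) = ((p + 1 : Nat) : Int) := by push_cast; ring
      have bnd : ((p + (k + 1) : Nat) : Int) = (((p + 1) + k : Nat) : Int) := by push_cast; ring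
      rw [step, bnd, ih (p + 1) (res + 1) (by omega) (by omega)]
      rw [hds, hdt, hc]
      simp only [cp2]
      push_cast
      omega
    · rw [if_neg (by simpa using hc)]
      rw [hds, hdt]
      simp only [cp2, if_neg hc]
      push_cast
      omega

theorem outerA_eq (rest : List String) (pre : List String) (prev : String) (res : Int)
    (h0 : 0 ≤ res) (hle : res.toNat ≤ prev.toList.length) :
    outerA (pre ++ prev :: rest) (PySem.List.pyRange ((pre.length : Int) + 1) (((pre ++ prev :: rest).length : Int)) 1) res
      = (foldA res.toNat prev.toList (rest.map String.toList) : Int) := by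
  induction rest generalizing pre prev res with
  | nil =>
    rw [PySem.List.pyRange_one_eq_nil (by simp)]
    simp only [outerA, foldA, List.map_nil]
    omega
  | cons cur rest ih =>
    rw [PySem.List.pyRange_one_cons (by push_cast [List.length_append, List.length_cons]; omega)]
    simp only [outerA]
    have e1 : ((pre.length : Int) + 1 - 1) = ((pre.length : Nat) : Int) := by ring
    have e2 : ((pre.length : Int) + 1) = ((pre.length + 1 : Nat) : Int) := by push_cast; ring
    rw [e1, e2, PySem.List.pyGet?_natCast, PySem.List.pyGet?_natCast,
      List.getElem?_append_right (by omega), List.getElem?_append_right (by omega)]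
    simp only [Nat.sub_self, show pre.length + 1 - pre.length = 1 from by omega,
      List.getElem?_cons_zero, List.getElem?_cons_succ, Option.getD_some, PySem.Str.len_eq]
    set k : Nat := min res.toNat cur.toList.length with hk
    have hinner := innerA_eq prev cur k 0 0 (by omega) (by omega)
    simp only [Nat.cast_zero, List.drop_zero, zero_add] at hinner
    have hln : min res ((cur.toList.length : Nat) : Int) = ((k : Nat) : Int) := by omega
    rw [hln, hinner]
    have hc2 := cp2_le_right prev.toList cur.toList
    set m : Nat := min k (cp2 prev.toList cur.toList) with hm
    have happ : pre ++ prev :: cur :: rest = (pre ++ [prev]) ++ cur :: rest := by simp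
    rw [happ, show ((pre.length + 1 : Nat) : Int) + 1 = (((pre ++ [prev]).length : Nat) : Int) + 1 from by push_cast [List.length_append, List.length_cons, List.length_nil]; ring]
    rw [show min ((k : Nat) : Int) ((cp2 prev.toList cur.toList : Nat) : Int) = ((m : Nat) : Int) from by omega]
    rw [ih (pre ++ [prev]) cur ((m : Nat) : Int) (by positivity) (by simp only [Int.toNat_natCast]; omega)]
    simp only [List.map_cons, foldA, Int.toNat_natCast]
    have : m = min res.toNat (cp2 prev.toList cur.toList) := by omega
    rw [this]

theorem foldA_eq_chain (ls : List (List Char)) (res : Nat) (prev : List Char)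
    (h : res ≤ prev.length) : foldA res prev ls = min res (chainN prev ls) := by
  induction ls generalizing res prev with
  | nil => simp only [foldA, chainN]; omega
  | cons cur rest ih =>
    simp only [foldA, chainN]
    have hc2 := cp2_le_right prev cur
    rw [ih _ cur (by omega)]
    omega

theorem chainN_strip (r0 : List Char) (rest : List (List Char))
    (h : [] ∉ r0 :: rest ∧ ∀ r ∈ r0 :: rest, r.headD ' ' = r0.headD ' ') :
    chainN r0 rest = 1 + chainN r0.tail (rest.map List.tail) := by
  induction rest generalizing r0 with
  | nil =>
    have h0 : r0 ≠ [] := by simpa using h.1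
    simp only [chainN, List.map_nil]
    cases r0 with
    | nil => exact absurd rfl h0
    | cons a s => simp; omega
  | cons l1 r ih =>
    obtain ⟨hne, hhd⟩ := h
    have h0 : r0 ≠ [] := by simp at hne; tauto
    have h1 : l1 ≠ [] := by simp at hne; tauto
    obtain ⟨a, s, rfl⟩ := List.exists_cons_of_ne_nil h0
    obtain ⟨b, t, rfl⟩ := List.exists_cons_of_ne_nil h1
    have hb : b = a := by simpa using hhd (b :: t) (by simp)
    subst hb
    simp only [chainN, List.map_cons, List.tail_cons, cp2, if_true]
    rw [ih (b :: t) ⟨by simp at hne; simp; tauto, ?_⟩]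
    · simp only [List.tail_cons]; omega
    · intro rr hrr
      rcases List.mem_cons.mp hrr with h' | h'
      · subst h'; rfl
      · simpa using hhd rr (by simp [h'])

theorem chainN_bad (r0 : List Char) (rest : List (List Char))
    (h : ¬ ([] ∉ r0 :: rest ∧ ∀ r ∈ r0 :: rest, r.headD ' ' = r0.headD ' ')) :
    chainN r0 rest = 0 := by
  induction rest generalizing r0 with
  | nil =>
    have : r0 = [] := by
      by_contra h0
      exact h ⟨by simpa using h0, by intro r hr; simp at hr; subst hr; rfl⟩
    subst this
    simp [chainN]
  | cons l1 r ih =>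
    simp only [chainN]
    by_cases h0 : r0 = []
    · subst h0; simp [cp2]
    by_cases h1 : l1 = []
    · subst h1
      obtain ⟨a, s, rfl⟩ := List.exists_cons_of_ne_nil h0
      simp [cp2]
    obtain ⟨a, s, rfl⟩ := List.exists_cons_of_ne_nil h0
    obtain ⟨b, t, rfl⟩ := List.exists_cons_of_ne_nil h1
    by_cases hab : b = a
    · subst hab
      have : chainN (b :: t) r = 0 := by
        apply ih
        intro hcontra
        obtain ⟨hne', hhd'⟩ := hcontra
        apply h
        constructor
        · simpa using hne'
        · intro rr hrr
          rcases List.mem_cons.mp hrr with h' | h'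
          · subst h'; rfl
          · rcases List.mem_cons.mp h' with h'' | h''
            · subst h''; rfl
            · simpa using hhd' rr (by simp [h''])
      omega
    · have : cp2 (a :: s) (b :: t) = 0 := by simp [cp2]; intro h'; exact absurd h'.symm hab
      omega

theorem chainN_eq_lcpRec (r0 : List Char) (rest : List (List Char)) :
    chainN r0 rest = lcpRec (r0 :: rest) := by
  by_cases h : [] ∉ r0 :: rest ∧ ∀ r ∈ r0 :: rest, r.headD ' ' = r0.headD ' '
  · have h0 : r0 ≠ [] := by have := h.1; simp at this; tauto
    rw [chainN_strip r0 rest h, lcpRec, dif_pos h,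
        chainN_eq_lcpRec r0.tail (rest.map List.tail)]
  · rw [chainN_bad r0 rest h, lcpRec, dif_neg h]
termination_by (r0.length : Nat)
decreasing_by
  have : r0 ≠ [] := by have := h.1; simp at this; tauto
  have := List.length_pos_of_ne_nil this
  simp only [List.length_tail]
  omega

theorem colAll_iff (r0 : List Char) (rest : List (List Char)) :
    (((r0 :: rest).map (fun r => r.headD ' ')).all
      (fun c => c = ((r0 :: rest).map (fun r => r.headD ' ')).headD ' ') = true)
      ↔ ∀ r ∈ r0 :: rest, r.headD ' ' = r0.headD ' ' := by
  simp only [List.map_cons, List.headD_cons, List.all_cons, Bool.and_eq_true,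
    decide_eq_true_eq, List.all_map, List.all_eq_true, Function.comp]
  constructor
  · rintro ⟨-, hmap⟩ r hr
    rcases List.mem_cons.mp hr with rfl | hr'
    · rfl
    · exact hmap r hr'
  · intro hall
    exact ⟨by simp, fun r hr => hall r (by simp [hr])⟩

theorem loopB_eq (rows : List (List Char)) (res : Int) :
    loopB (pyZipCols rows) res = res + (lcpRec rows : Int) := by
  match rows with
  | [] => simp [pyZipCols, lcpRec, loopB]
  | r0 :: rest =>
    rw [pyZipCols]
    by_cases hne : [] ∉ r0 :: rest
    · rw [dif_pos hne]
      simp only [loopB]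
      by_cases hall : ∀ r ∈ r0 :: rest, r.headD ' ' = r0.headD ' '
      · rw [if_pos ((colAll_iff r0 rest).mpr hall)]
        rw [loopB_eq (r0.tail :: rest.map List.tail) (res + 1)]
        rw [show lcpRec (r0 :: rest) = 1 + lcpRec (r0.tail :: rest.map List.tail) from by
          rw [lcpRec, dif_pos ⟨hne, hall⟩]]
        push_cast
        ring
      · rw [if_neg (fun hc => hall ((colAll_iff r0 rest).mp hc))]
        rw [show lcpRec (r0 :: rest) = 0 from by rw [lcpRec, dif_neg (by tauto)]]
        simp
    · rw [dif_neg hne]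
      rw [show lcpRec (r0 :: rest) = 0 from by rw [lcpRec, dif_neg (by tauto)]]
      simp [loopB]
termination_by ((rows.headD []).length : Nat)
decreasing_by
  have : r0 ≠ [] := by simp at hne; tauto
  have := List.length_pos_of_ne_nil this
  simp only [List.headD_cons, List.length_tail]
  omega

-- ===== VERDICT (by name: the statement is the Claim_ definition above) =====
theorem commonLen_spec : Claim_equal_commonLen := by
  intro lines _
  show commonLen lines = commonLen_alt lines
  cases lines with
  | nil =>
    unfold commonLen commonLen_alt
    rw [if_pos (by simp)]
    rw [List.map_nil, pyZipCols]
    simp [loopB]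
  | cons l0 ls =>
    unfold commonLen
    rw [if_neg (by push_cast [List.length_cons]; omega)]
    rw [show (0 : Int) = ((0 : Nat) : Int) from rfl, PySem.List.pyGet?_natCast]
    simp only [List.getElem?_cons_zero, Option.getD_some, PySem.Str.len_eq]
    have ho := outerA_eq ls [] l0 ((l0.toList.length : Nat) : Int) (by positivity) (by simp)
    simp only [List.nil_append, List.length_nil, Nat.cast_zero, zero_add,
      Int.toNat_natCast] at ho
    rw [ho]
    rw [foldA_eq_chain _ _ _ (le_refl _)]
    have hch := chainN_le l0.toList (ls.map String.toList)
    rw [show min l0.toList.length (chainN l0.toList (ls.map String.toList))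
          = chainN l0.toList (ls.map String.toList) from by omega]
    rw [chainN_eq_lcpRec]
    unfold commonLen_alt
    rw [List.map_cons, loopB_eq]
    simp
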